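-- pv_equiv track=rewrite | github.com/iroxusux/Pyrox | pyrox/services/checklist.py | _get_sections_tests
-- ===== SOURCE A (Python) =====
-- def _get_sections_tests(lines: list) -> dict:
--     """Helper function to get sections that contain tests."""
--     tests = {}
--     current_test = None
--     for line in lines:
--         if line.strip() == '':
--             current_test = None
--         else:
--             if not current_test:
--                 current_test = line.strip()
--                 tests[current_test] = {'lines': []}
--             if not current_test:
--                 raise ValueError("Test name cannot be empty.")
--             tests[current_test]['lines'].append(line)
--     return tests
-- ===== SOURCE B (Python) =====
-- def _get_sections_tests(lines: list) -> dict: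
--     """Group lines into named test sections: extract each maximal run of
--     non-blank lines with a two-pointer scan; the run's first line (stripped)
--     names the section and the whole run is its 'lines'."""
--     tests = {}
--     i, n = 0, len(lines)
--     while i < n:
--         if lines[i].strip() == '':
--             i += 1
--             continue
--         j = i
--         while j < n and lines[j].strip() != '':
--             j += 1
--         run = lines[i:j]
--         tests[run[0].strip()] = {'lines': run}
--         i = j
--     return tests
-- ===== Notes on version B (the rewrite author's own statement) =====
-- stated objective: alternative
-- what changed: Replaces A's per-line state machine (tests dict + current_test register mutated line by line) with a two-pointer scan that extracts each maximal run of non-blank lines at once and inserts the whole section in one step.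
import Mathlib
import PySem

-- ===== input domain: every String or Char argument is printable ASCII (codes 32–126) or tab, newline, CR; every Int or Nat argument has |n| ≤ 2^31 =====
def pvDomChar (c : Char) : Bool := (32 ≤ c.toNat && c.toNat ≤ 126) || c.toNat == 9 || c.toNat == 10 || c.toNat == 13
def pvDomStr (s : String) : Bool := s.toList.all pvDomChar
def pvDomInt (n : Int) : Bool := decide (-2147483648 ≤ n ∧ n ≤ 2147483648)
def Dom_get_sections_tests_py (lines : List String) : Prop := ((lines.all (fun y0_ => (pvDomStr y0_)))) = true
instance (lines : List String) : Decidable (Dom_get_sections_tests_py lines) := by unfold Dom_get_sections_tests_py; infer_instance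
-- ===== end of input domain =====

-- B replaces A's per-line state machine by a two-pointer scan that extracts each
-- maximal run of non-blank lines at once (objective: alternative decomposition, same cost).

-- ===== PORT A =====
-- one loop iteration of A: state = (tests, current_test).
-- Python's 'if not current_test' tests for None / '': current_test is only ever
-- None or line.strip() with line.strip() != '', so it is exactly 'is none', and
-- the second 'if not current_test: raise ValueError' is unreachable (A is total).
def pvStepA (st : PySem.Dict String (PySem.Dict String (List String)) × Option String)
    (line : String) : PySem.Dict String (PySem.Dict String (List String)) × Option String :=
  if PySem.Str.strip line == "" then (st.1, none)
  else
    let (tests, ct) :=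
      match st.2 with
      | none =>
          let n := PySem.Str.strip line
          (st.1.insert n (PySem.Dict.ofList [("lines", ([] : List String))]), n)
      | some c => (st.1, c)
    (tests.modify ct PySem.Dict.empty
      (fun dd => dd.modify "lines" ([] : List String) (· ++ [line])), some ct)

def get_sections_tests_py (lines : List String) : List (String × List (String × List String)) :=
  ((lines.foldl pvStepA (PySem.Dict.empty, none)).1).items.map (fun p => (p.1, p.2.items))

-- ===== PORT B =====
-- inner while loop of Source B: first index k ≥ j with k = n or lines[k].strip() == ''
def pvFindBlank (lines : List String) (j : Nat) : Nat :=
  if h : j < lines.length then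
    if PySem.Str.strip lines[j] == "" then j else pvFindBlank lines (j + 1)
  else j
termination_by lines.length - j

-- the port's termination (decreasing_by of pvBLoop) needs these two facts about the inner while loop
theorem pvFindBlank_ge (lines : List String) (j : Nat) : j ≤ pvFindBlank lines j := by
  unfold pvFindBlank
  split
  next h =>
    split
    · exact Nat.le_refl j
    · exact Nat.le_trans (Nat.le_succ j) (pvFindBlank_ge lines (j + 1))
  next h => exact Nat.le_refl j
termination_by lines.length - j
decreasing_by omega

theorem pvFindBlank_lt (lines : List String) (i : Nat) (h : i < lines.length)
    (hnb : (PySem.Str.strip lines[i] == "") = false) : i < pvFindBlank lines i := by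
  unfold pvFindBlank
  rw [dif_pos h, if_neg (by simp [hnb])]
  exact Nat.lt_of_lt_of_le (Nat.lt_succ_self i) (pvFindBlank_ge lines (i + 1))

-- outer while loop of Source B, state = (i, tests); lines[i] is in range under the guard,
-- lines[i:j] = (lines.drop i).take (j - i) is exact for 0 ≤ i ≤ j, run[0] = run.headD "" (run nonempty)
def pvBLoop (lines : List String) (i : Nat)
    (tests : PySem.Dict String (PySem.Dict String (List String))) :
    PySem.Dict String (PySem.Dict String (List String)) :=
  if h : i < lines.length then
    if PySem.Str.strip lines[i] == "" then
      pvBLoop lines (i + 1) tests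
    else
      let j := pvFindBlank lines i
      let run := (lines.drop i).take (j - i)
      pvBLoop lines j
        (tests.insert (PySem.Str.strip (run.headD "")) (PySem.Dict.ofList [("lines", run)]))
  else tests
termination_by lines.length - i
decreasing_by
  · omega
  · have := pvFindBlank_lt lines i h (by simpa using ‹¬ (PySem.Str.strip lines[i] == "") = true›)
    omega

def get_sections_tests_py_alt (lines : List String) : List (String × List (String × List String)) :=
  (pvBLoop lines 0 PySem.Dict.empty).items.map (fun p => (p.1, p.2.items))

-- ===== PRECONDITION & SPEC =====
def Spec_get_sections_tests_py (lines : List String) (out : List (String × List (String × List String))) : Prop := out = get_sections_tests_py_alt lines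
instance (lines : List String) (out : List (String × List (String × List String))) : Decidable (Spec_get_sections_tests_py lines out) := by unfold Spec_get_sections_tests_py; infer_instance

-- ===== CLAIM (what is proved, stated in full; the proofs are below) =====
def Claim_equal_get_sections_tests_py : Prop := ∀ (lines : List String), Dom_get_sections_tests_py lines → Spec_get_sections_tests_py lines (get_sections_tests_py lines)

-- ===== LEMMAS AND PROOFS =====

theorem pvStepA_blank (d : PySem.Dict String (PySem.Dict String (List String)))
    (c : Option String) (line : String) (h : (PySem.Str.strip line == "") = true) :
    pvStepA (d, c) line = (d, none) := by
  simp [pvStepA, h]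

theorem pvStepA_some (d : PySem.Dict String (PySem.Dict String (List String)))
    (n line : String) (h : (PySem.Str.strip line == "") = false) :
    pvStepA (d, some n) line
      = (d.modify n PySem.Dict.empty
          (fun dd => dd.modify "lines" ([] : List String) (· ++ [line])), some n) := by
  simp [pvStepA, h]

theorem pvAppendFold (r : List String) (d : PySem.Dict String (PySem.Dict String (List String)))
    (n : String) (hr : ∀ y ∈ r, (PySem.Str.strip y == "") = false) (ls : List String) :
    r.foldl pvStepA (d.insert n (PySem.Dict.mk [("lines", ls)]), some n)
      = (d.insert n (PySem.Dict.mk [("lines", ls ++ r)]), some n) := by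
  induction r generalizing ls with
  | nil => simp
  | cons y r ih =>
      have hy : (PySem.Str.strip y == "") = false := hr y (by simp)
      rw [List.foldl_cons, pvStepA_some _ _ _ hy]
      have hmod : (d.insert n (PySem.Dict.mk [("lines", ls)])).modify n PySem.Dict.empty
          (fun dd => dd.modify "lines" ([] : List String) (· ++ [y]))
          = d.insert n (PySem.Dict.mk [("lines", ls ++ [y])]) := by
        simp [PySem.Dict.modify, PySem.Dict.getD_insert_self, PySem.Dict.insert_insert_self]
        rfl
      rw [hmod, ih (fun z hz => hr z (by simp [hz])) (ls ++ [y])]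
      simp

theorem pvRunFold (x : String) (r : List String)
    (d : PySem.Dict String (PySem.Dict String (List String)))
    (hx : (PySem.Str.strip x == "") = false)
    (hr : ∀ y ∈ r, (PySem.Str.strip y == "") = false) :
    (x :: r).foldl pvStepA (d, none)
      = (d.insert (PySem.Str.strip x) (PySem.Dict.mk [("lines", x :: r)]),
         some (PySem.Str.strip x)) := by
  rw [List.foldl_cons]
  have h1 : pvStepA (d, none) x
      = (d.insert (PySem.Str.strip x) (PySem.Dict.mk [("lines", [x])]),
         some (PySem.Str.strip x)) := by
    simp [pvStepA, hx, PySem.Dict.modify, PySem.Dict.getD_insert_self,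
      PySem.Dict.insert_insert_self, PySem.Dict.ofList]
    rfl
  rw [h1, pvAppendFold r d _ hr [x]]
  simp

theorem pvFindBlank_le (lines : List String) (j : Nat) (h : j ≤ lines.length) :
    pvFindBlank lines j ≤ lines.length := by
  unfold pvFindBlank
  split
  next h1 =>
    split
    · exact Nat.le_of_lt h1
    · exact pvFindBlank_le lines (j + 1) h1
  next h1 => exact h
termination_by lines.length - j
decreasing_by omega

theorem pvFindBlank_blank (lines : List String) (j k : Nat) (he : pvFindBlank lines j = k)
    (h : k < lines.length) : (PySem.Str.strip lines[k] == "") = true := by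
  by_cases h1 : j < lines.length
  · by_cases hb : (PySem.Str.strip lines[j] == "") = true
    · have he2 : pvFindBlank lines j = j := by rw [pvFindBlank, dif_pos h1, if_pos hb]
      obtain rfl : j = k := he2.symm.trans he
      exact hb
    · have he3 : pvFindBlank lines j = pvFindBlank lines (j + 1) := by
        rw [pvFindBlank, dif_pos h1, if_neg hb]
      rw [he3] at he
      exact pvFindBlank_blank lines (j + 1) k he h
  · have he2 : pvFindBlank lines j = j := by rw [pvFindBlank, dif_neg h1]
    obtain rfl : j = k := he2.symm.trans he
    omega
termination_by lines.length - j
decreasing_by omega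

theorem pvFindBlank_run_nonblank (lines : List String) (j : Nat) :
    ∀ y ∈ (lines.drop j).take (pvFindBlank lines j - j),
      (PySem.Str.strip y == "") = false := by
  intro y hy
  by_cases h : j < lines.length
  · by_cases hb : (PySem.Str.strip lines[j] == "") = true
    · have he : pvFindBlank lines j = j := by rw [pvFindBlank, dif_pos h, if_pos hb]
      rw [he] at hy
      simp at hy
    · have he : pvFindBlank lines j = pvFindBlank lines (j + 1) := by
        rw [pvFindBlank, dif_pos h, if_neg hb]
      have hge : j + 1 ≤ pvFindBlank lines (j + 1) := pvFindBlank_ge lines (j + 1)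
      rw [he, List.drop_eq_getElem_cons h] at hy
      obtain ⟨t, ht⟩ : ∃ t, pvFindBlank lines (j + 1) - j = t + 1 :=
        ⟨pvFindBlank lines (j + 1) - j - 1, by omega⟩
      rw [ht, List.take_succ_cons] at hy
      rcases List.mem_cons.mp hy with rfl | hy'
      · simpa using hb
      · have h2 : pvFindBlank lines (j + 1) - (j + 1) = t := by omega
        exact pvFindBlank_run_nonblank lines (j + 1) y (by rw [h2]; exact hy')
  · rw [List.drop_eq_nil_of_le (by omega)] at hy
    simp at hy
termination_by lines.length - j
decreasing_by omega

theorem pvBLoop_nonblank (lines : List String) (i : Nat)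
    (tests : PySem.Dict String (PySem.Dict String (List String))) (h : i < lines.length)
    (hbf : (PySem.Str.strip lines[i] == "") = false) :
    pvBLoop lines i tests
      = pvBLoop lines (pvFindBlank lines i)
          (tests.insert
            (PySem.Str.strip (((lines.drop i).take (pvFindBlank lines i - i)).headD ""))
            (PySem.Dict.ofList
              [("lines", (lines.drop i).take (pvFindBlank lines i - i))])) := by
  rw [pvBLoop, dif_pos h, if_neg (by simp [hbf])]

theorem pvInv (lines : List String) (m : Nat) :
    ∀ (i : Nat), lines.length - i ≤ m →
    ∀ (d : PySem.Dict String (PySem.Dict String (List String))) (c : Option String),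
    (c = none ∨ ∀ h : i < lines.length, (PySem.Str.strip lines[i] == "") = true) →
    ((lines.drop i).foldl pvStepA (d, c)).1 = pvBLoop lines i d := by
  induction m with
  | zero =>
      intro i hm d c _
      rw [List.drop_eq_nil_of_le (by omega), pvBLoop, dif_neg (by omega)]
      rfl
  | succ m ih =>
      intro i hm d c hc
      by_cases h : i < lines.length
      · by_cases hb : (PySem.Str.strip lines[i] == "") = true
        · rw [List.drop_eq_getElem_cons h, List.foldl_cons, pvStepA_blank _ _ _ hb]
          rw [pvBLoop, dif_pos h, if_pos hb]
          exact ih (i + 1) (by omega) d none (Or.inl rfl)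
        · have hbf : (PySem.Str.strip lines[i] == "") = false := by simpa using hb
          have hc' : c = none := by
            rcases hc with h0 | h0
            · exact h0
            · exact absurd (h0 h) (by simp [hbf])
          subst hc'
          obtain ⟨j, hj⟩ : ∃ j, pvFindBlank lines i = j := ⟨_, rfl⟩
          have hij : i < j := hj ▸ pvFindBlank_lt lines i h hbf
          have hjn : j ≤ lines.length := hj ▸ pvFindBlank_le lines i (Nat.le_of_lt h)
          have hnb : ∀ y ∈ (lines.drop i).take (j - i),
              (PySem.Str.strip y == "") = false := by
            rw [← hj]; exact pvFindBlank_run_nonblank lines i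
          have hblank : ∀ h2 : j < lines.length,
              (PySem.Str.strip lines[j] == "") = true :=
            fun h2 => pvFindBlank_blank lines i j hj h2
          have hcons : (lines.drop i).take (j - i)
              = lines[i] :: ((lines.drop (i + 1)).take (j - i - 1)) := by
            rw [List.drop_eq_getElem_cons h]
            obtain ⟨t, ht⟩ : ∃ t, j - i = t + 1 := ⟨j - i - 1, by omega⟩
            rw [ht, List.take_succ_cons]
            simp
          have hdec : lines.drop i = (lines.drop i).take (j - i) ++ lines.drop j := by
            have h2 : lines.drop j = (lines.drop i).drop (j - i) := by
              rw [List.drop_drop]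
              congr 1
              omega
            rw [h2]
            exact (List.take_append_drop _ _).symm
          have hnbtail : ∀ y ∈ (lines.drop (i + 1)).take (j - i - 1),
              (PySem.Str.strip y == "") = false := by
            intro y hy
            exact hnb y (by rw [hcons]; exact List.mem_cons_of_mem _ hy)
          rw [hdec, List.foldl_append, hcons,
            pvRunFold lines[i] _ d hbf hnbtail]
          rw [pvBLoop_nonblank lines i d h hbf, hj, hcons]
          simp only [List.headD_cons]
          have hofl : (PySem.Dict.ofList
              [("lines", lines[i] :: ((lines.drop (i + 1)).take (j - i - 1)))] :
              PySem.Dict String (List String))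
              = PySem.Dict.mk [("lines", lines[i] :: ((lines.drop (i + 1)).take (j - i - 1)))] := rfl
          rw [hofl]
          exact ih j (by omega)
            (d.insert (PySem.Str.strip lines[i])
              (PySem.Dict.mk [("lines", lines[i] :: ((lines.drop (i + 1)).take (j - i - 1)))]))
            (some (PySem.Str.strip lines[i]))
            (Or.inr hblank)
      · rw [List.drop_eq_nil_of_le (by omega), pvBLoop, dif_neg (by omega)]
        rfl

-- ===== VERDICT (by name: the statement is the Claim_ definition above) =====
theorem get_sections_tests_py_spec : Claim_equal_get_sections_tests_py := by
  intro lines _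
  unfold Spec_get_sections_tests_py get_sections_tests_py get_sections_tests_py_alt
  have h := pvInv lines lines.length 0 (by omega) PySem.Dict.empty none (Or.inl rfl)
  rw [List.drop_zero] at h
  rw [h]
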